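-- pv_equiv track=rewrite | github.com/jwestfromtheeast/CS115 | Homework/musicrecplus.py | mostPopularUser
-- ===== SOURCE A (Python) =====
-- def mostPopularUser(userDict):
--     """
--     Returns the user with the most liked artists.
--     """
--     maxLen = 0
--     user = []
--     for userName, lst in userDict.items():
--         if userName[-1] != '$' and len(lst) == maxLen:
--             user.append(userName)
--         elif userName[-1] != '$' and len(lst) > maxLen:
--             maxLen = len(lst)
--             user = [userName]
--     return user
-- ===== SOURCE B (Python) =====
-- def mostPopularUser(userDict):
--     """
--     Returns the user with the most liked artists.
--     """
--     maxLen = max((len(lst) for name, lst in userDict.items() if name[-1] != '$'),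
--                  default=0)
--     return [name for name, lst in userDict.items()
--             if name[-1] != '$' and len(lst) == maxLen]
-- ===== Notes on version B (the rewrite author's own statement) =====
-- stated objective: simpler
-- what changed: Replaces the interleaved argmax-with-ties scan (mutable maxLen/user state, append-or-reset branches) by a max-then-filter decomposition: one pass computes the maximum list length among non-'$' users (default 0), a second comprehension collects all such users with that length.
import Mathlib
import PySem

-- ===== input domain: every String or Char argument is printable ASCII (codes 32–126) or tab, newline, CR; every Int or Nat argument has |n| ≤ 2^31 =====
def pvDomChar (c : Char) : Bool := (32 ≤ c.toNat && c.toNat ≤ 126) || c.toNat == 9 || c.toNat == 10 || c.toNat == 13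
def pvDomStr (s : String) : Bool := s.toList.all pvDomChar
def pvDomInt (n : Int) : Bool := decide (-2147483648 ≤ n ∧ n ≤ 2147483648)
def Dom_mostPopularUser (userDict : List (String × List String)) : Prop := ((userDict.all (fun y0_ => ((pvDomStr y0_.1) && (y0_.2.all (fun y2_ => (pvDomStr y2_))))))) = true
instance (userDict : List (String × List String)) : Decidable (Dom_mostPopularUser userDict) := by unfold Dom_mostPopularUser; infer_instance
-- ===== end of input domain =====

-- B replaces A's interleaved argmax-with-ties scan by a max-then-filter decomposition (simpler; same O(n) cost).

-- shared helper: Python's `name[-1] != '$'` test on a dict entry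
def pvOk (p : String × List String) : Bool := PySem.Str.pyGet? p.1 (-1) != some '$'

-- ===== PORT A =====
def mostPopularUser (userDict : List (String × List String)) : List String :=
  (userDict.foldl (fun st p =>
      if pvOk p && (p.2.length == st.1) then (st.1, st.2 ++ [p.1])
      else if pvOk p && decide (p.2.length > st.1) then (p.2.length, [p.1])
      else st)
    ((0 : Nat), ([] : List String))).2

-- ===== PORT B =====
def mostPopularUser_alt (userDict : List (String × List String)) : List String :=
  let maxLen := (userDict.filter pvOk).foldl (fun m p => max m p.2.length) 0
  (userDict.filter (fun p => pvOk p && (p.2.length == maxLen))).map Prod.fst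

-- ===== PRECONDITION & SPEC =====
-- Pre_ excludes (1) entries whose key is "", on which Python A raises IndexError at userName[-1];
-- (2) association lists with duplicate keys, which cannot arise from a Python dict (a dict has
-- distinct keys), so no Python input corresponds to them.
def Pre_mostPopularUser (userDict : List (String × List String)) : Prop :=
  (∀ p ∈ userDict, p.1 ≠ "") ∧ (userDict.map Prod.fst).Nodup
instance (userDict : List (String × List String)) : Decidable (Pre_mostPopularUser userDict) := by
  unfold Pre_mostPopularUser; infer_instance
def pvWitness_mostPopularUser : (List (String × List String)) :=
  [("alex", ["a", "b"]), ("bob$", ["c"]), ("carol", ["d", "e"])]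
def Spec_mostPopularUser (userDict : List (String × List String)) (out : List String) : Prop := out = mostPopularUser_alt userDict
instance (userDict : List (String × List String)) (out : List String) : Decidable (Spec_mostPopularUser userDict out) := by unfold Spec_mostPopularUser; infer_instance

-- ===== CLAIM (what is proved, stated in full; the proofs are below) =====
def Claim_equal_mostPopularUser : Prop := ∀ (userDict : List (String × List String)), Dom_mostPopularUser userDict → Pre_mostPopularUser userDict → Spec_mostPopularUser userDict (mostPopularUser userDict)

-- ===== LEMMAS AND PROOFS =====

-- the running maximum A maintains, started at m
def pvM (m : Nat) (l : List (String × List String)) : Nat :=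
  l.foldl (fun acc p => if pvOk p then max acc p.2.length else acc) m

lemma pvM_le (m : Nat) (l : List (String × List String)) : m ≤ pvM m l := by
  induction l generalizing m with
  | nil => simp [pvM]
  | cons p l ih =>
      simp only [pvM, List.foldl_cons]
      by_cases h : pvOk p
      · simp only [h, if_pos]
        exact le_trans (Nat.le_max_left _ _) (ih _)
      · simp only [h, if_neg, Bool.false_eq_true, not_false_iff]
        exact ih m

-- characterisation of A's fold for any starting state
lemma foldA (l : List (String × List String)) (m : Nat) (u : List String) :
    l.foldl (fun st p =>
        if pvOk p && (p.2.length == st.1) then (st.1, st.2 ++ [p.1])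
        else if pvOk p && decide (p.2.length > st.1) then (p.2.length, [p.1])
        else st) (m, u)
    = (pvM m l,
       (if m = pvM m l then u else []) ++
         (l.filter (fun p => pvOk p && (p.2.length == pvM m l))).map Prod.fst) := by
  induction l generalizing m u with
  | nil => simp [pvM]
  | cons p l ih =>
      simp only [List.foldl_cons, List.filter_cons]
      by_cases hok : pvOk p
      · have hM : pvM m (p :: l) = pvM (max m p.2.length) l := by
          simp [pvM, hok]
        rw [hM]
        rcases Nat.lt_trichotomy p.2.length m with hlt | heq | hgt
        · -- len < m : entry skipped, and it cannot reach the final max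
          rw [Nat.max_eq_left (le_of_lt hlt)]
          have hple := pvM_le m l
          rw [if_neg (by simp [hok]; omega), if_neg (by simp [hok]; omega),
              ih m u, if_neg (show ¬ (pvOk p && (p.2.length == pvM m l)) = true by
                simp [hok]; omega)]
        · -- len = m : tie, appended
          rw [Nat.max_eq_left (Nat.le_of_eq heq)]
          rw [if_pos (by simp [hok, heq]), ih m (u ++ [p.1])]
          by_cases hfin : m = pvM m l
          · rw [if_pos hfin, if_pos hfin,
                if_pos (show (pvOk p && (p.2.length == pvM m l)) = true by
                  simp [hok, heq, ← hfin])]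
            simp only [List.map_cons, List.cons_append, List.nil_append,
              List.append_assoc]
          · rw [if_neg hfin, if_neg hfin,
                if_neg (show ¬ (pvOk p && (p.2.length == pvM m l)) = true by
                  simp [hok, heq]; exact hfin)]
        · -- len > m : reset
          rw [Nat.max_eq_right (le_of_lt hgt)]
          have hple := pvM_le p.2.length l
          rw [if_neg (by simp [hok]; omega), if_pos (by simp [hok, hgt]),
              ih p.2.length [p.1],
              if_neg (show ¬ m = pvM p.2.length l by omega)]
          by_cases hfin : p.2.length = pvM p.2.length l
          · rw [if_pos hfin,
                if_pos (show (pvOk p && (p.2.length == pvM p.2.length l)) = true by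
                  simp [hok, ← hfin])]
            simp only [List.map_cons, List.cons_append, List.nil_append]
          · rw [if_neg hfin,
                if_neg (show ¬ (pvOk p && (p.2.length == pvM p.2.length l)) = true by
                  simp [hok]; exact hfin)]
      · have hM : pvM m (p :: l) = pvM m l := by simp [pvM, hok]
        rw [hM, if_neg (by simp [hok]), if_neg (by simp [hok]), ih m u,
            if_neg (show ¬ (pvOk p && (p.2.length == pvM m l)) = true by simp [hok])]

-- B's first pass computes the same maximum
lemma maxB_eq_pvM (l : List (String × List String)) (m : Nat) :
    (l.filter pvOk).foldl (fun a p => max a p.2.length) m = pvM m l := by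
  induction l generalizing m with
  | nil => simp [pvM]
  | cons p l ih =>
      simp only [List.filter_cons, pvM, List.foldl_cons]
      by_cases h : pvOk p
      · simp only [h, if_pos]
        simpa [pvM] using ih (max m p.2.length)
      · simp only [h, Bool.false_eq_true, if_neg, not_false_iff]
        simpa [pvM] using ih m

-- ===== VERDICT (by name: the statement is the Claim_ definition above) =====
theorem mostPopularUser_spec : Claim_equal_mostPopularUser := by
  intro l _ _
  unfold Spec_mostPopularUser mostPopularUser mostPopularUser_alt
  rw [foldA l 0 [], maxB_eq_pvM]
  simp
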